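-- pv_equiv track=rewrite | github.com/mcarbonera/flask-celery | api-producer/app/duplicate_db_service/duplicate_chinook.py | remove_primary_key
-- ===== SOURCE A (Python) =====
-- def remove_primary_key(columns, rows, primary_key):
--   if primary_key not in columns:
--     return columns, rows
--
--   pk_index = columns.index(primary_key)
--   new_columns = [col for i, col in enumerate(columns) if i != pk_index]
--   new_rows = [
--     [value for i, value in enumerate(row) if i != pk_index] for row in rows
--   ]
--   return new_columns, new_rows
-- ===== SOURCE B (Python) =====
-- def remove_primary_key(columns, rows, primary_key):
--   # Single scan with an iterator: collect columns before the first match; on the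
--   # match, exhaust the iterator for the suffix and splice every row around the
--   # length of the collected prefix. No membership pre-test, no .index call.
--   before = []
--   it = iter(columns)
--   for col in it:
--     if col == primary_key:
--       after = list(it)
--       k = len(before)
--       return before + after, [row[:k] + row[k+1:] for row in rows]
--     before.append(col)
--   return columns, rows
-- ===== Notes on version B (the rewrite author's own statement) =====
-- stated objective: alternative
-- what changed: Replaces A's membership guard + .index lookup + enumerate-filter comprehensions with a single scan over an iterator that accumulates the prefix up to the first match, takes the remaining iterator as the suffix, and splices each row around the prefix length; no pre-test and no per-cell index comparison.
import Mathlib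
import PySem

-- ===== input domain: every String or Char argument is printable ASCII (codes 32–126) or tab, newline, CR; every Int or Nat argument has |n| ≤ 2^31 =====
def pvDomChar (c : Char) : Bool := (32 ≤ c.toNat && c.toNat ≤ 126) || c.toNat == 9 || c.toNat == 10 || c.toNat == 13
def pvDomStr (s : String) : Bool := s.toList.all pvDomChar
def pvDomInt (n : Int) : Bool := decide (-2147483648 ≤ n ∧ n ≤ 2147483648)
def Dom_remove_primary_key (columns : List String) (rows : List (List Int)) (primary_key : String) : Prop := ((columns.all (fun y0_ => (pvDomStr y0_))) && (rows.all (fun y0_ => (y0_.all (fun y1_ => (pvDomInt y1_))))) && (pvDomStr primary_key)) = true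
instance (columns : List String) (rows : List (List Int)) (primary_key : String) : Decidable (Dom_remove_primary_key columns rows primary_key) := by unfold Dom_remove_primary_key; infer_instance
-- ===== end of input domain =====

-- B replaces A's guard/index/enumerate-filter with one scan that accumulates the prefix up
-- to the first match and splices each row around the prefix length (alternative; same cost).


-- ===== PORT A =====
-- literal port of A: membership guard, columns.index, then enumerate-filter comprehensions
def remove_primary_key (columns : List String) (rows : List (List Int)) (primary_key : String) : List String × List (List Int) :=
  if ¬ (columns.contains primary_key) then (columns, rows)
  else
    match PySem.List.index? columns primary_key with
    | none => (columns, rows)  -- unreachable: the guard ensures membership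
    | some pk_index =>
      let new_columns := ((PySem.List.enumerate columns 0).filter (fun p => p.1 ≠ (pk_index : Int))).map (·.2)
      let new_rows := rows.map (fun row =>
        ((PySem.List.enumerate row 0).filter (fun p => p.1 ≠ (pk_index : Int))).map (·.2))
      (new_columns, new_rows)

-- ===== PORT B =====
-- literal port of Source B's loop: `before` is the accumulated prefix, the iterator suffix is the
-- remaining list; row[:k] + row[k+1:] with k = before.length ≥ 0 is exactly take k ++ drop (k+1)
def pvGoB (pk : String) (rows : List (List Int)) : List String → List String → Option (List String × List (List Int))
  | [], _ => none
  | col :: rest, before =>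
    if col == pk then
      some (before ++ rest,
        rows.map (fun row => row.take before.length ++ row.drop (before.length + 1)))
    else pvGoB pk rows rest (before ++ [col])

def remove_primary_key_alt (columns : List String) (rows : List (List Int)) (primary_key : String) : List String × List (List Int) :=
  match pvGoB primary_key rows columns [] with
  | none => (columns, rows)
  | some res => res

-- ===== PRECONDITION & SPEC =====
def Spec_remove_primary_key (columns : List String) (rows : List (List Int)) (primary_key : String) (out : List String × List (List Int)) : Prop := out = remove_primary_key_alt columns rows primary_key
instance (columns : List String) (rows : List (List Int)) (primary_key : String) (out : List String × List (List Int)) : Decidable (Spec_remove_primary_key columns rows primary_key out) := by unfold Spec_remove_primary_key; infer_instance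

-- ===== CLAIM (what is proved, stated in full; the proofs are below) =====
def Claim_equal_remove_primary_key : Prop := ∀ (columns : List String) (rows : List (List Int)) (primary_key : String), Dom_remove_primary_key columns rows primary_key → Spec_remove_primary_key columns rows primary_key (remove_primary_key columns rows primary_key)

-- ===== LEMMAS AND PROOFS =====

-- removing index k by enumerate-filter equals take k ++ drop (k+1)
theorem pv_enumFilter_eq_splice {α : Type} (l : List α) (s : Int) (k : Nat) :
    ((PySem.List.enumerate l s).filter (fun p => p.1 ≠ s + (k : Int))).map (·.2)
      = l.take k ++ l.drop (k + 1) := by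
  induction l generalizing s k with
  | nil => simp [PySem.List.enumerate_nil]
  | cons x xs ih =>
    rw [PySem.List.enumerate_cons]
    cases k with
    | zero =>
      have hall : (PySem.List.enumerate xs (s + 1)).filter (fun p => decide (p.1 ≠ s + ((0 : Nat) : Int))) = PySem.List.enumerate xs (s + 1) := by
        apply List.filter_eq_self.mpr
        intro p hp
        obtain ⟨j, hj, rfl⟩ := (PySem.List.mem_enumerate_iff xs (s+1) p).mp hp
        simp only [decide_eq_true_eq]
        omega
      simp only [List.filter_cons]
      rw [show (decide (((s, x) : Int × α).1 ≠ s + ((0 : Nat) : Int))) = false by simp]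
      simp only [Bool.false_eq_true, if_false, hall, PySem.List.map_snd_enumerate]
      simp
    | succ j =>
      simp only [List.filter_cons]
      rw [show (decide (((s, x) : Int × α).1 ≠ s + ((j + 1 : Nat) : Int))) = true by simp; omega]
      rw [if_pos rfl]
      simp only [List.map_cons]
      rw [show s + ((j + 1 : Nat) : Int) = (s + 1) + (j : Int) by push_cast; ring]
      rw [ih (s + 1) j]
      simp

theorem pv_goB_none (pk : String) (rows : List (List Int)) (cols before : List String)
    (h : PySem.List.index? cols pk = none) : pvGoB pk rows cols before = none := by
  induction cols generalizing before with
  | nil => rfl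
  | cons c cs ih =>
    rw [PySem.List.index?_eq_idxOf?] at h ih
    simp only [List.idxOf?_cons] at h
    by_cases hc : c == pk
    · simp [hc] at h
    · simp only [hc, Bool.false_eq_true, if_false] at h
      have hnone : List.idxOf? pk cs = none := by
        cases hx : List.idxOf? pk cs <;> simp [hx] at h ⊢
      simp [pvGoB, hc, ih _ hnone]

theorem pv_goB_some (pk : String) (rows : List (List Int)) (cols before : List String) (k : Nat)
    (h : PySem.List.index? cols pk = some k) :
    pvGoB pk rows cols before = some (before ++ cols.take k ++ cols.drop (k + 1),
      rows.map (fun r => r.take (before.length + k) ++ r.drop (before.length + k + 1))) := by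
  induction cols generalizing before k with
  | nil => simp [PySem.List.index?] at h
  | cons c cs ih =>
    rw [PySem.List.index?_eq_idxOf?] at h ih
    simp only [List.idxOf?_cons] at h
    by_cases hc : c == pk
    · simp only [hc, if_true, Option.some.injEq] at h
      subst h
      simp [pvGoB, hc]
    · simp only [hc, Bool.false_eq_true, if_false] at h
      cases hx : List.idxOf? pk cs with
      | none => simp [hx] at h
      | some j =>
        rw [hx] at h
        simp only [Option.map_some, Option.some.injEq] at h
        subst h
        simp only [pvGoB, hc, Bool.false_eq_true, if_false]
        rw [ih (before ++ [c]) j hx]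
        simp only [Option.some.injEq, Prod.mk.injEq, List.length_append, List.length_cons,
          List.length_nil, List.append_assoc]
        constructor
        · simp [List.take_succ_cons, List.drop_succ_cons]
        · apply List.map_congr_left
          intro r _
          congr 2 <;> omega

theorem pv_remove_eq (columns : List String) (rows : List (List Int)) (primary_key : String) :
    remove_primary_key columns rows primary_key = remove_primary_key_alt columns rows primary_key := by
  unfold remove_primary_key remove_primary_key_alt
  cases hidx : PySem.List.index? columns primary_key with
  | none =>
    rw [pv_goB_none primary_key rows columns [] hidx]
    by_cases h : columns.contains primary_key
    · rw [if_neg (by simpa using h)]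
    · rw [if_pos (by simpa using h)]
  | some k =>
    have hs : (PySem.List.index? columns primary_key).isSome := by rw [hidx]; rfl
    have hmem : primary_key ∈ columns := (PySem.List.index?_isSome_iff columns primary_key).mp hs
    rw [if_neg (by simpa using hmem), pv_goB_some primary_key rows columns [] k hidx]
    dsimp only
    simp only [Prod.mk.injEq]
    constructor
    · have := pv_enumFilter_eq_splice columns 0 k
      simpa using this
    · apply List.map_congr_left
      intro r _
      have := pv_enumFilter_eq_splice r 0 k
      simpa using this

-- ===== VERDICT (by name: the statement is the Claim_ definition above) =====
theorem remove_primary_key_spec : Claim_equal_remove_primary_key := by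
  intro columns rows primary_key _
  exact pv_remove_eq columns rows primary_key
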